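-- pv_equiv track=rewrite | github.com/Maxtraveler/fas | qr_encoder.py | numeric_qr_encode
-- ===== SOURCE A (Python) =====
-- def numeric_qr_encode(digits):
--     """
--     Цифровое QR-кодирование
--
--     Args:
--         digits: Строка с цифрами
--
--     Returns:
--         tuple: (encoded_bits, steps) - закодированные биты и список шагов
--     """
--     result_bits = ""
--     steps = []
--
--     # Обработать группы по 3 цифры
--     i = 0
--     while i < len(digits):
--         group = digits[i:i+3]
--
--         if len(group) == 3:
--             # 3 цифры → 10 бит
--             value = int(group)
--             bits = format(value, '010b')
--             result_bits += bits
--             steps.append(f"Группа '{group}' → {value} → {bits} (10 бит)")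
--             i += 3
--         elif len(group) == 2:
--             # 2 цифры → 7 бит
--             value = int(group)
--             bits = format(value, '07b')
--             result_bits += bits
--             steps.append(f"Группа '{group}' → {value} → {bits} (7 бит)")
--             i += 2
--         else:
--             # 1 цифра → 4 бита
--             value = int(group)
--             bits = format(value, '04b')
--             result_bits += bits
--             steps.append(f"Группа '{group}' → {value} → {bits} (4 бита)")
--             i += 1
--
--     return result_bits, steps
-- ===== SOURCE B (Python) =====
-- def numeric_qr_encode(digits):
--     """Right-to-left variant: the group boundary is computed from end % 3,
--     the bit width arithmetically as 3*take+1, and the output is assembled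
--     back-to-front by prepending."""
--     result_bits = ""
--     steps = []
--     end = len(digits)
--     while end > 0:
--         take = end % 3 or 3
--         start = end - take
--         group = digits[start:end]
--         value = int(group)
--         width = 3 * take + 1
--         bits = format(value, '0{}b'.format(width))
--         label = f"{width} бит" + ("а" if width == 4 else "")
--         result_bits = bits + result_bits
--         steps.insert(0, f"Группа '{group}' → {value} → {bits} ({label})")
--         end = start
--     return result_bits, steps
-- ===== Notes on version B (the rewrite author's own statement) =====
-- stated objective: alternative
-- what changed: A scans left-to-right with a three-branch width table; B walks the string right-to-left peeling the last group via end % 3 or 3, computes the bit width arithmetically as 3*take+1 (and the label from the width), and assembles both outputs back-to-front by prepending.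
import Mathlib
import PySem

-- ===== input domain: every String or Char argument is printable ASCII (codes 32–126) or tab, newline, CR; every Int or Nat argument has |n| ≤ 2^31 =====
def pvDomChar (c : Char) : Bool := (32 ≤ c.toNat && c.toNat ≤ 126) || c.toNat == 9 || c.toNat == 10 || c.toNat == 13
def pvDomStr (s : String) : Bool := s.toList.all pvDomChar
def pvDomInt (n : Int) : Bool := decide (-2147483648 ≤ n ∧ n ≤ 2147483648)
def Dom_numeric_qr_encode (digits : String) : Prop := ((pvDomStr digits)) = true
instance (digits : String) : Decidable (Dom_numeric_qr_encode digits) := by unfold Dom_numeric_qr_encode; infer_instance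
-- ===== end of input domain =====

-- B walks the string RIGHT-TO-LEFT (group boundary from end % 3, bit width computed
-- arithmetically as 3*take+1, output assembled back-to-front by prepending);
-- same O(n) cost (objective: alternative decomposition).

-- f-string  f"Группа '{g}' → {v} → {bits} ({label})"  used by both Pythons
def pvFStep (g : List Char) (v : Int) (bits : List Char) (label : String) : String :=
  String.ofList ("Группа '".toList ++ g ++ "' → ".toList ++ PySem.Int.toChars v
    ++ " → ".toList ++ bits ++ " (".toList ++ label.toList ++ [')'])

-- ===== PORT A =====
-- the while loop: state = remaining suffix of digits (i advances by the consumed amount),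
-- plus the two accumulators result_bits / steps.  int(group) raises on bad groups: Pre_
-- excludes those inputs, the port's `.getD 0` is never reached inside Pre_.
def numeric_qr_encode_go (rest result_bits : List Char) (steps : List String) :
    String × List String :=
  match rest with
  | a :: b :: c :: rst =>                       -- len(group) == 3 → 10 бит
      let group := [a, b, c]
      let value := (PySem.Int.ofChars? group).getD 0
      let bits := PySem.Chars.zfill (PySem.Int.toBinChars value) 10
      numeric_qr_encode_go rst (result_bits ++ bits)
        (steps ++ [pvFStep group value bits "10 бит"])
  | [a, b] =>                                   -- len(group) == 2 → 7 бит
      let group := [a, b]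
      let value := (PySem.Int.ofChars? group).getD 0
      let bits := PySem.Chars.zfill (PySem.Int.toBinChars value) 7
      numeric_qr_encode_go [] (result_bits ++ bits)
        (steps ++ [pvFStep group value bits "7 бит"])
  | [a] =>                                      -- else: 1 digit → 4 бита
      let group := [a]
      let value := (PySem.Int.ofChars? group).getD 0
      let bits := PySem.Chars.zfill (PySem.Int.toBinChars value) 4
      numeric_qr_encode_go [] (result_bits ++ bits)
        (steps ++ [pvFStep group value bits "4 бита"])
  | [] => (String.ofList result_bits, steps)

def numeric_qr_encode (digits : String) : String × List String :=
  numeric_qr_encode_go digits.toList [] []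

-- ===== PORT B =====
-- Source B's while loop over the shrinking right boundary `end`; each round peels the LAST
-- group (take = end % 3 or 3), prepends its bits to result_bits and its line to steps.
def numeric_qr_encode_altGo (cs : List Char) (e : Nat)
    (result_bits : List Char) (steps : List String) : List Char × List String :=
  if _h : e = 0 then (result_bits, steps)
  else
    let take := if e % 3 = 0 then 3 else e % 3          -- end % 3 or 3
    let start := e - take
    let group := PySem.List.slice cs (some (start : Int)) (some (e : Int))
    let value := (PySem.Int.ofChars? group).getD 0
    let width : Int := 3 * (take : Int) + 1
    let bits := PySem.Chars.zfill (PySem.Int.toBinChars value) width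
    let label := String.ofList (PySem.Int.toChars width ++ " бит".toList
      ++ (if width = 4 then ['а'] else []))
    numeric_qr_encode_altGo cs start (bits ++ result_bits)
      (pvFStep group value bits label :: steps)
  termination_by e
  decreasing_by split_ifs <;> omega

def numeric_qr_encode_alt (digits : String) : String × List String :=
  let r := numeric_qr_encode_altGo digits.toList digits.toList.length [] []
  (String.ofList r.1, r.2)

-- ===== PRECONDITION & SPEC =====
-- the groups A slices off (they depend only on the length: triples, then a tail of ≤ 2)
def pvChunks (cs : List Char) : List (List Char) :=
  match cs with
  | a :: b :: c :: rst => [a, b, c] :: pvChunks rst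
  | [] => []
  | rest => [rest]

-- Pre_ excludes exactly the inputs where Python's int(group) raises ValueError for some group.
def Pre_numeric_qr_encode (digits : String) : Prop :=
  ∀ g ∈ pvChunks digits.toList, (PySem.Int.ofChars? g).isSome = true
instance (digits : String) : Decidable (Pre_numeric_qr_encode digits) := by
  unfold Pre_numeric_qr_encode; infer_instance

def pvWitness_numeric_qr_encode : String := "12345"

def Spec_numeric_qr_encode (digits : String) (out : String × List String) : Prop :=
  out = numeric_qr_encode_alt digits
instance (digits : String) (out : String × List String) :
    Decidable (Spec_numeric_qr_encode digits out) := by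
  unfold Spec_numeric_qr_encode; infer_instance

-- ===== CLAIM (what is proved, stated in full; the proofs are below) =====
def Claim_equal_numeric_qr_encode : Prop :=
  ∀ (digits : String), Dom_numeric_qr_encode digits → Pre_numeric_qr_encode digits →
    Spec_numeric_qr_encode digits (numeric_qr_encode digits)

-- ===== LEMMAS AND PROOFS =====

-- the 10/7/4-bit encoding and the step line of one group (proof vocabulary for both sides)
def pvWidth (n : Nat) : Int := if n = 3 then 10 else if n = 2 then 7 else 4
def pvLabel (n : Nat) : String := if n = 3 then "10 бит" else if n = 2 then "7 бит" else "4 бита"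
def pvEnc (g : List Char) : List Char :=
  PySem.Chars.zfill (PySem.Int.toBinChars ((PySem.Int.ofChars? g).getD 0)) (pvWidth g.length)
def pvStep (g : List Char) : String :=
  pvFStep g ((PySem.Int.ofChars? g).getD 0) (pvEnc g) (pvLabel g.length)

lemma goA_eq (rest result_bits : List Char) (steps : List String) :
    numeric_qr_encode_go rest result_bits steps =
      (String.ofList (result_bits ++ ((pvChunks rest).map pvEnc).flatten),
        steps ++ (pvChunks rest).map pvStep) := by
  fun_induction numeric_qr_encode_go rest result_bits steps
  all_goals simp_all [pvChunks, pvEnc, pvStep, pvWidth, pvLabel, List.append_assoc]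
  all_goals exact ⟨rfl, rfl⟩

-- appending one trailing group of length 1..3 to a 3-divisible prefix adds one chunk
lemma chunks_snoc (g : List Char) (hg : g.length = 1 ∨ g.length = 2 ∨ g.length = 3)
    (l : List Char) : l.length % 3 = 0 → pvChunks (l ++ g) = pvChunks l ++ [g] := by
  fun_induction pvChunks l with
  | case1 a b c rst ih =>
      intro hl
      have : rst.length % 3 = 0 := by simp [List.length_cons] at hl; omega
      simp [pvChunks, ih this]
  | case2 =>
      intro _
      rcases g with _ | ⟨x, _ | ⟨y, _ | ⟨z, _ | w⟩⟩⟩ <;> simp_all [pvChunks]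
  | case3 rest h1 h2 =>
      intro hl
      rcases rest with _ | ⟨a, _ | ⟨b, _ | ⟨c, r⟩⟩⟩
      · exact absurd rfl h2
      · simp at hl
      · simp at hl
      · exact absurd rfl (h1 a b c r)

lemma width_label (t : Nat) (h : t = 1 ∨ t = 2 ∨ t = 3) :
    (3 * (t : Int) + 1 = pvWidth t) ∧
      String.ofList (PySem.Int.toChars (3 * (t : Int) + 1) ++ " бит".toList
        ++ (if (3 * (t : Int) + 1) = 4 then ['а'] else [])) = pvLabel t := by
  rcases h with rfl | rfl | rfl <;> exact ⟨by norm_num [pvWidth], by decide⟩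

lemma goB_eq (cs : List Char) (e : Nat) (he : e ≤ cs.length)
    (result_bits : List Char) (steps : List String) :
    numeric_qr_encode_altGo cs e result_bits steps =
      (((pvChunks (cs.take e)).map pvEnc).flatten ++ result_bits,
        (pvChunks (cs.take e)).map pvStep ++ steps) := by
  fun_induction numeric_qr_encode_altGo cs e result_bits steps with
  | case1 => simp [pvChunks]
  | case2 e rb st hne take start group value width bits label ih =>
      have htake : take = 1 ∨ take = 2 ∨ take = 3 := by
        simp only [take]; split_ifs <;> omega
      have htle : take ≤ e := by
        simp only [take]; split_ifs <;> omega
      have hstart : start ≤ cs.length := by omega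
      have hsmod : start % 3 = 0 := by
        simp only [start, take]; split_ifs <;> omega
      have hgroup : group = (cs.drop start).take take := by
        simp only [group, PySem.List.slice_natCast]
        congr 1; omega
      have hglen : group.length = take := by
        rw [hgroup]; simp; omega
      have hsplit : cs.take e = cs.take start ++ group := by
        rw [hgroup, show e = start + take by omega, List.take_add]
      have hchunks : pvChunks (cs.take e) = pvChunks (cs.take start) ++ [group] := by
        rw [hsplit]
        exact chunks_snoc group (by omega) _ (by simp; omega)
      obtain ⟨hw, hl⟩ := width_label take htake
      have hbits : bits = pvEnc group := by
        simp only [bits, pvEnc, hglen, value, width, hw]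
      have hlabel : label = pvLabel take := by
        rcases htake with h | h | h <;> simp only [label, width, h] <;> decide
      have hstep : pvFStep group value bits label = pvStep group := by
        simp only [hbits, hlabel, pvStep, pvEnc, value, hglen]
      rw [ih hstart, hchunks, hstep, hbits]
      simp [List.append_assoc]

-- ===== VERDICT (by name: the statement is the Claim_ definition above) =====
theorem numeric_qr_encode_spec : Claim_equal_numeric_qr_encode := by
  intro digits _ _
  unfold Spec_numeric_qr_encode numeric_qr_encode numeric_qr_encode_alt
  rw [goA_eq, goB_eq _ _ le_rfl,
    show List.take digits.toList.length digits.toList = digits.toList by simp]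
  simp
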